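-- pv_equiv track=rewrite | github.com/jackal092927/skillX | scripts/serve_round0_monitor.py | _stage_states_from_round_events
-- ===== SOURCE A (Python) =====
-- from typing import Any
--
-- ROUND_STAGE_ORDER = ("executor", "role_a", "role_b")
--
-- def _stage_states_from_round_events(events: list[dict[str, Any]]) -> tuple[dict[str, str], str | None]:
--     stage_states = {stage: "pending" for stage in ROUND_STAGE_ORDER}
--     latest_event_type = None
--     if not events:
--         return stage_states, None
--
--     event_types = [str(event.get("event_type") or "") for event in events]
--     latest_event_type = event_types[-1] or None
--     if "executor_completed" in event_types:
--         stage_states["executor"] = "completed"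
--     if "role_a_completed" in event_types:
--         stage_states["role_a"] = "completed"
--     if "role_b_completed" in event_types:
--         stage_states["role_b"] = "completed"
--
--     if "round_started" in event_types and "executor_completed" not in event_types:
--         stage_states["executor"] = "running"
--     elif "executor_completed" in event_types and "role_a_completed" not in event_types:
--         stage_states["role_a"] = "running"
--     elif "role_a_completed" in event_types and "role_b_completed" not in event_types:
--         stage_states["role_b"] = "running"
--
--     return stage_states, latest_event_type
-- ===== SOURCE B (Python) =====
-- _EVENT_BIT = {"round_started": 1, "executor_completed": 2,
--               "role_a_completed": 4, "role_b_completed": 8}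
--
-- # Precomputed decode table: entry m gives (executor, role_a, role_b) states for
-- # the bitmask m of significant events seen.
-- _STATE_TABLE = (
--     ("pending",   "pending",   "pending"),    # 0
--     ("running",   "pending",   "pending"),    # 1
--     ("completed", "running",   "pending"),    # 2
--     ("completed", "running",   "pending"),    # 3
--     ("pending",   "completed", "running"),    # 4
--     ("running",   "completed", "pending"),    # 5
--     ("completed", "completed", "running"),    # 6
--     ("completed", "completed", "running"),    # 7
--     ("pending",   "pending",   "completed"),  # 8
--     ("running",   "pending",   "completed"),  # 9
--     ("completed", "running",   "completed"),  # 10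
--     ("completed", "running",   "completed"),  # 11
--     ("pending",   "completed", "completed"),  # 12
--     ("running",   "completed", "completed"),  # 13
--     ("completed", "completed", "completed"),  # 14
--     ("completed", "completed", "completed"),  # 15
-- )
--
-- def _stage_states_from_round_events(events):
--     if not events:
--         return {"executor": "pending", "role_a": "pending", "role_b": "pending"}, None
--     mask = 0
--     last = ""
--     for event in events:
--         last = str(event.get("event_type") or "")
--         mask |= _EVENT_BIT.get(last, 0)
--     ex, ra, rb = _STATE_TABLE[mask]
--     return {"executor": ex, "role_a": ra, "role_b": rb}, last or None
-- ===== Notes on version B (the rewrite author's own statement) =====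
-- stated objective: alternative
-- what changed: Replaces A's intermediate list of event types, four membership scans and an elif-chain of dict mutations by a finite-state encoding: one pass ORs each event's bit (round_started=1, executor_completed=2, role_a_completed=4, role_b_completed=8) into a 4-bit mask and remembers the last type, then the whole states dict is read off a precomputed 16-entry decode table indexed by the mask.
import Mathlib
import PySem

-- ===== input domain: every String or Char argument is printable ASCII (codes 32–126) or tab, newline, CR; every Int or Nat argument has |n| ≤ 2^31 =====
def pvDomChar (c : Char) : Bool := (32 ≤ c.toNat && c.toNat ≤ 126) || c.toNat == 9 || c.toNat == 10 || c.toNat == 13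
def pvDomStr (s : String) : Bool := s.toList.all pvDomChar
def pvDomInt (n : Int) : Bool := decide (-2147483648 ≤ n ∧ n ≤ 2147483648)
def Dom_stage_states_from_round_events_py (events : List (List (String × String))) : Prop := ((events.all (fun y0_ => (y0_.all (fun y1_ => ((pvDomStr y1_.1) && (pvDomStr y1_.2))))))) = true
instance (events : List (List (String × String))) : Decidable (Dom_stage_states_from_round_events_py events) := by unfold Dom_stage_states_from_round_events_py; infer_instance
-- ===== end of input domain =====

-- B replaces A's list of event types + four membership scans + elif-chain of dict mutations by a
-- bitmask accumulated in one pass and a precomputed 16-entry decode table (objective: alternative).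

-- ===== PORT A =====
-- str(event.get("event_type") or "")
def pvAEventType (event : List (String × String)) : String :=
  match (PySem.Dict.mk event).get? "event_type" with
  | none => ""
  | some s => if s = "" then "" else s

def stage_states_from_round_events_py (events : List (List (String × String))) : (List (String × String)) × Option String :=
  let stage_states : PySem.Dict String String :=
    (["executor", "role_a", "role_b"].foldl (fun d s => d.insert s "pending") PySem.Dict.empty)
  if events = [] then (stage_states.items, none)
  else
    let event_types := events.map pvAEventType
    -- event_types[-1] or None (the list is nonempty here, so pyGet? is some)
    let latest_event_type : Option String :=
      match PySem.List.pyGet? event_types (-1) with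
      | none => none
      | some s => if s = "" then none else some s
    let d1 := if "executor_completed" ∈ event_types then stage_states.insert "executor" "completed" else stage_states
    let d2 := if "role_a_completed" ∈ event_types then d1.insert "role_a" "completed" else d1
    let d3 := if "role_b_completed" ∈ event_types then d2.insert "role_b" "completed" else d2
    let d4 :=
      if "round_started" ∈ event_types ∧ "executor_completed" ∉ event_types then
        d3.insert "executor" "running"
      else if "executor_completed" ∈ event_types ∧ "role_a_completed" ∉ event_types then
        d3.insert "role_a" "running"
      else if "role_a_completed" ∈ event_types ∧ "role_b_completed" ∉ event_types then
        d3.insert "role_b" "running"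
      else d3
    (d4.items, latest_event_type)

-- ===== PORT B =====
def pvEventBit : List (String × Nat) :=
  [("round_started", 1), ("executor_completed", 2), ("role_a_completed", 4), ("role_b_completed", 8)]

def pvStateTable : List (String × String × String) :=
  [("pending",   "pending",   "pending"),
   ("running",   "pending",   "pending"),
   ("completed", "running",   "pending"),
   ("completed", "running",   "pending"),
   ("pending",   "completed", "running"),
   ("running",   "completed", "pending"),
   ("completed", "completed", "running"),
   ("completed", "completed", "running"),
   ("pending",   "pending",   "completed"),
   ("running",   "pending",   "completed"),
   ("completed", "running",   "completed"),
   ("completed", "running",   "completed"),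
   ("pending",   "completed", "completed"),
   ("running",   "completed", "completed"),
   ("completed", "completed", "completed"),
   ("completed", "completed", "completed")]

-- str(event.get("event_type") or "")  (B's loop body recomputes it each iteration)
def pvBEventType (event : List (String × String)) : String :=
  match (PySem.Dict.mk event).get? "event_type" with
  | none => ""
  | some s => if s = "" then "" else s

def stage_states_from_round_events_py_alt (events : List (List (String × String))) : (List (String × String)) × Option String :=
  if events = [] then ([("executor", "pending"), ("role_a", "pending"), ("role_b", "pending")], none)
  else
    let p := events.foldl
      (fun (acc : Nat × String) event =>
        let last := pvBEventType event
        (acc.1 ||| (PySem.Dict.mk pvEventBit).getD last 0, last))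
      (0, "")
    -- _STATE_TABLE[mask]: mask < 16 always, so the lookup never misses; getD makes it total
    let trip := (PySem.List.pyGet? pvStateTable (p.1 : Int)).getD ("pending", "pending", "pending")
    ([("executor", trip.1), ("role_a", trip.2.1), ("role_b", trip.2.2)],
     if p.2 = "" then none else some p.2)

-- ===== PRECONDITION & SPEC =====
def Spec_stage_states_from_round_events_py (events : List (List (String × String))) (out : (List (String × String)) × Option String) : Prop := out = stage_states_from_round_events_py_alt events
instance (events : List (List (String × String))) (out : (List (String × String)) × Option String) : Decidable (Spec_stage_states_from_round_events_py events out) := by unfold Spec_stage_states_from_round_events_py; infer_instance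

-- ===== CLAIM (what is proved, stated in full; the proofs are below) =====
def Claim_equal_stage_states_from_round_events_py : Prop := ∀ (events : List (List (String × String))), Dom_stage_states_from_round_events_py events → Spec_stage_states_from_round_events_py events (stage_states_from_round_events_py events)

-- ===== LEMMAS AND PROOFS =====

def pvBits (r e a b : Bool) : Nat :=
  (cond r 1 0) ||| (cond e 2 0) ||| (cond a 4 0) ||| (cond b 8 0)

theorem pvBEventType_eq : pvBEventType = pvAEventType := rfl

-- evaluating the bit lookup
theorem pvBitEval (t : String) :
    (PySem.Dict.mk pvEventBit).getD t 0
      = (if "round_started" = t then 1 else if "executor_completed" = t then 2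
         else if "role_a_completed" = t then 4 else if "role_b_completed" = t then 8 else 0) := by
  simp [pvEventBit, PySem.Dict.getD_eq_get?_getD, PySem.Dict.get?_mk_cons]
  split_ifs <;> rfl

-- B's single pass computes (fold of bits, last type).
theorem pvFoldB (xs : List (List (String × String))) (m : Nat) (l : String) :
    xs.foldl
      (fun (acc : Nat × String) event =>
        (acc.1 ||| (PySem.Dict.mk pvEventBit).getD (pvBEventType event) 0, pvBEventType event)) (m, l)
      = ((xs.map pvBEventType).foldl (fun m t => m ||| (PySem.Dict.mk pvEventBit).getD t 0) m,
         (xs.map pvBEventType).getLastD l) := by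
  induction xs generalizing m l with
  | nil => rfl
  | cons x t ih =>
    rw [List.foldl_cons, ih]
    refine Prod.ext rfl ?_
    cases t with
    | nil => rfl
    | cons y ys => simp [List.getLastD_eq_getLast?, List.getLast?_map, List.getLast?_cons]

theorem pvFold_lor (ts : List String) (m : Nat) :
    ts.foldl (fun m t => m ||| (PySem.Dict.mk pvEventBit).getD t 0) m
      = m ||| ts.foldl (fun m t => m ||| (PySem.Dict.mk pvEventBit).getD t 0) 0 := by
  induction ts generalizing m with
  | nil => simp
  | cons t ts ih =>
    rw [List.foldl_cons, List.foldl_cons, ih, ih (0 ||| _)]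
    simp [Nat.or_assoc]

-- the accumulated mask is the bitmask of the four memberships
theorem pvMask_eq (ts : List String) :
    ts.foldl (fun m t => m ||| (PySem.Dict.mk pvEventBit).getD t 0) 0
      = pvBits (decide ("round_started" ∈ ts)) (decide ("executor_completed" ∈ ts))
               (decide ("role_a_completed" ∈ ts)) (decide ("role_b_completed" ∈ ts)) := by
  induction ts with
  | nil => rfl
  | cons t ts ih =>
    rw [List.foldl_cons, pvFold_lor, ih, pvBitEval]
    by_cases h0 : "round_started" ∈ ts <;>
    by_cases h1 : "executor_completed" ∈ ts <;>
    by_cases h2 : "role_a_completed" ∈ ts <;>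
    by_cases h3 : "role_b_completed" ∈ ts <;>
      split_ifs with e0 e1 e2 e3 <;>
      (try subst e0) <;> (try subst e1) <;> (try subst e2) <;> (try subst e3) <;>
      simp_all [pvBits, List.mem_cons]

-- ===== VERDICT (by name: the statement is the Claim_ definition above) =====
theorem stage_states_from_round_events_py_spec : Claim_equal_stage_states_from_round_events_py := by
  intro events _
  unfold Spec_stage_states_from_round_events_py
  cases events with
  | nil => rfl
  | cons x xs =>
    unfold stage_states_from_round_events_py stage_states_from_round_events_py_alt
    simp only [List.cons_ne_nil, ite_false]
    rw [pvFoldB]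
    simp only [pvBEventType_eq, pvMask_eq, PySem.List.pyGet?_neg_one]
    refine Prod.ext ?_ ?_
    · generalize (x :: xs).map pvAEventType = et
      by_cases h0 : "round_started" ∈ et <;>
      by_cases h1 : "executor_completed" ∈ et <;>
      by_cases h2 : "role_a_completed" ∈ et <;>
      by_cases h3 : "role_b_completed" ∈ et <;>
        simp only [h0, h1, h2, h3, decide_true, decide_false, not_true, not_false_iff,
          and_true, and_false, if_true, if_false] <;> decide
    · rcases h : ((x :: xs).map pvAEventType).getLast? with _ | v
      · simp at h
      · rw [List.map_cons] at h
        simp [h]
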